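-- pv_equiv track=rewrite | github.com/elxande/C-digosAtal | menorElemento/main.py | menorElemento
-- ===== SOURCE A (Python) =====
-- def menorElemento(lista, primeiroElemento, ultimoElemento):
--
--     if ( primeiroElemento > ultimoElemento):
--         return ultimoElemento + 1
--
--     if (primeiroElemento != lista[primeiroElemento]):
--         return primeiroElemento
--
--     meio = (primeiroElemento + ultimoElemento)//2
--
--     if (lista[meio] == meio):
--         return menorElemento(lista, meio+1, ultimoElemento)
--
--     return menorElemento(lista, primeiroElemento, meio)
-- ===== SOURCE B (Python) =====
-- def menorElemento(lista, primeiroElemento, ultimoElemento):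
--     # Iterative half-open-interval binary search: [lo, hi) replaces A's
--     # tail recursion on inclusive bounds; returns hi (== ultimoElemento+1
--     # shape) when the window empties.
--     lo, hi = primeiroElemento, ultimoElemento + 1
--     while lo < hi:
--         if lista[lo] != lo:
--             return lo
--         meio = (lo + hi - 1) // 2
--         if lista[meio] == meio:
--             lo = meio + 1
--         else:
--             hi = meio + 1
--     return hi
-- ===== Notes on version B (the rewrite author's own statement) =====
-- stated objective: alternative
-- what changed: A's tail recursion on inclusive bounds [primeiro, ultimo] becomes an iterative while-loop over a half-open window [lo, hi), with the empty-window return hi replacing ultimoElemento+1 and hi = meio+1 replacing ultimoElemento = meio.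
-- outside the precondition, e.g. on menorElemento([0, 5], 0, 3): A returns 1, B returns 1; on menorElemento([0, -1], -1, 0): A returns 1, B returns 1
import Mathlib
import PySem

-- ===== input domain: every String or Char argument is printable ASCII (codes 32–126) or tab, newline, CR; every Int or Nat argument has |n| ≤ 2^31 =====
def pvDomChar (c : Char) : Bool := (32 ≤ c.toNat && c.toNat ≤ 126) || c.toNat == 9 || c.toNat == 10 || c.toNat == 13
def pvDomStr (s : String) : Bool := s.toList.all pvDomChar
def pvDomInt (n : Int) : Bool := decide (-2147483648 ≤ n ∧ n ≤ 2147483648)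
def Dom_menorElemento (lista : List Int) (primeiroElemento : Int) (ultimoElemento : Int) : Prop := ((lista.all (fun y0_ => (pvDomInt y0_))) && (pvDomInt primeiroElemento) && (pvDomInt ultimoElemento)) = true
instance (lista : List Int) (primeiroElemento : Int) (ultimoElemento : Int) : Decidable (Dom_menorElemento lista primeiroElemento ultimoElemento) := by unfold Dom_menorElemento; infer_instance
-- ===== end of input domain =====

-- B rewrites A's tail recursion on inclusive bounds as an iterative half-open-window
-- binary search; both Pythons agree on every input, the proof covers Pre_.

-- termination helper for both ports, cited in decreasing_by
theorem pvMid_lt (p u : Int) (h : p < u) : PySem.Int.floordiv (p + u) 2 < u := by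
  rw [PySem.Int.floordiv_eq_ediv_of_pos (by omega)]; omega

theorem pvMid_ge (p u : Int) (h : p ≤ u) : p ≤ PySem.Int.floordiv (p + u) 2 := by
  rw [PySem.Int.floordiv_eq_ediv_of_pos (by omega)]; omega

-- ===== PORT A =====
-- literal port of A's recursion; where Python raises IndexError (pyGet? = none,
-- outside Pre_) the port returns 0
def menorElemento (lista : List Int) (primeiroElemento : Int) (ultimoElemento : Int) : Int :=
  if primeiroElemento > ultimoElemento then ultimoElemento + 1
  else
    match h1 : PySem.List.pyGet? lista primeiroElemento with
    | none => 0
    | some v =>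
      if primeiroElemento ≠ v then primeiroElemento
      else
        let meio := PySem.Int.floordiv (primeiroElemento + ultimoElemento) 2
        match h2 : PySem.List.pyGet? lista meio with
        | none => 0
        | some w =>
          if w = meio then menorElemento lista (meio + 1) ultimoElemento
          else menorElemento lista primeiroElemento meio
termination_by (ultimoElemento + 1 - primeiroElemento).toNat
decreasing_by
  · have := pvMid_ge primeiroElemento ultimoElemento (by omega)
    have := pvMid_lt primeiroElemento ultimoElemento
    omega
  · -- shrinking to [p, meio]: here meio < ultimo, else meio = p and w = v = p = meio
    rename_i hne hw
    have hge := pvMid_ge primeiroElemento ultimoElemento (by omega)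
    have hlt := pvMid_lt primeiroElemento ultimoElemento
    by_cases hpu : primeiroElemento < ultimoElemento
    · have := hlt hpu; omega
    · exfalso
      have hmeq : PySem.Int.floordiv (primeiroElemento + ultimoElemento) 2 = primeiroElemento := by
        have : primeiroElemento + ultimoElemento = primeiroElemento + primeiroElemento := by omega
        rw [this, PySem.Int.floordiv_eq_ediv_of_pos (by omega)]; omega
      simp only [meio] at h2 hw
      rw [hmeq] at h2
      rw [h1] at h2
      cases h2
      simp at hne
      exact hw (by omega)

-- ===== PORT B =====
-- port of Source B: the while loop over the half-open window [lo, hi)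
def menorLoop (lista : List Int) (lo : Int) (hi : Int) : Int :=
  if hlh : lo < hi then
    match h1 : PySem.List.pyGet? lista lo with
    | none => 0   -- Python raises IndexError here (outside Pre_)
    | some v =>
      if v ≠ lo then lo
      else
        let meio := PySem.Int.floordiv (lo + hi - 1) 2
        match h2 : PySem.List.pyGet? lista meio with
        | none => 0
        | some w =>
          if w = meio then menorLoop lista (meio + 1) hi
          else menorLoop lista lo (meio + 1)
  else hi
termination_by (hi - lo).toNat
decreasing_by
  · have := pvMid_ge lo (hi - 1) (by omega)
    have : lo + hi - 1 = lo + (hi - 1) := by omega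
    rw [this] at *
    have := pvMid_ge lo (hi - 1) (by omega)
    omega
  · rename_i hne hw
    have heq : lo + hi - 1 = lo + (hi - 1) := by omega
    rw [heq] at *
    have hge := pvMid_ge lo (hi - 1) (by omega)
    have hlt := pvMid_lt lo (hi - 1)
    by_cases hpu : lo < hi - 1
    · have := hlt hpu; omega
    · exfalso
      have hmeq : PySem.Int.floordiv (lo + (hi - 1)) 2 = lo := by
        have : lo + (hi - 1) = lo + lo := by omega
        rw [this, PySem.Int.floordiv_eq_ediv_of_pos (by omega)]; omega
      simp only [meio] at h2 hw
      rw [show lo + hi - 1 = lo + (hi - 1) by omega] at h2 hw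
      rw [hmeq] at h2 hw
      rw [h1] at h2
      cases h2
      simp at hne
      exact hw (by omega)

def menorElemento_alt (lista : List Int) (primeiroElemento : Int) (ultimoElemento : Int) : Int :=
  menorLoop lista primeiroElemento (ultimoElemento + 1)

-- ===== PRECONDITION & SPEC =====
-- Pre_ excludes inputs with primeiro ≤ ultimo whose bounds leave [0, len(lista))
-- and whose first list access does not already return: beyond that first access,
-- whether A raises IndexError or happens to return (via CPython's negative-index
-- wraparound or an early exit before reaching an out-of-range midpoint) depends on
-- the whole recursion trace and is an accident of the call, not a specified value;
-- examples where A still returns are in claim.json's cites (B agrees with A there too).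
def Pre_menorElemento (lista : List Int) (primeiroElemento : Int) (ultimoElemento : Int) : Prop :=
  primeiroElemento > ultimoElemento ∨
    (0 ≤ primeiroElemento ∧ ultimoElemento < (lista.length : Int)) ∨
    (primeiroElemento ≤ ultimoElemento ∧
      PySem.Raise.InRange lista.length primeiroElemento ∧
      PySem.List.pyGet? lista primeiroElemento ≠ some primeiroElemento)
instance (lista : List Int) (primeiroElemento : Int) (ultimoElemento : Int) : Decidable (Pre_menorElemento lista primeiroElemento ultimoElemento) := by unfold Pre_menorElemento; infer_instance

def pvWitness_menorElemento : List Int × Int × Int := ([0, 1, 5, 6], 0, 3)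

def Spec_menorElemento (lista : List Int) (primeiroElemento : Int) (ultimoElemento : Int) (out : Int) : Prop := out = menorElemento_alt lista primeiroElemento ultimoElemento
instance (lista : List Int) (primeiroElemento : Int) (ultimoElemento : Int) (out : Int) : Decidable (Spec_menorElemento lista primeiroElemento ultimoElemento out) := by unfold Spec_menorElemento; infer_instance

-- ===== CLAIM (what is proved, stated in full; the proofs are below) =====
def Claim_equal_menorElemento : Prop := ∀ (lista : List Int) (primeiroElemento : Int) (ultimoElemento : Int), Dom_menorElemento lista primeiroElemento ultimoElemento → Pre_menorElemento lista primeiroElemento ultimoElemento → Spec_menorElemento lista primeiroElemento ultimoElemento (menorElemento lista primeiroElemento ultimoElemento)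

-- ===== LEMMAS AND PROOFS =====

-- the two ports agree on every input (even outside Pre_, since both map the
-- IndexError region to 0)
theorem menorElemento_eq_loop (lista : List Int) (p u : Int) :
    menorElemento lista p u = menorLoop lista p (u + 1) := by
  fun_induction menorElemento lista p u with
  | case1 p u hgt =>
    rw [menorLoop, dif_neg (by omega)]
  | case2 p u hgt h1 =>
    rw [menorLoop, dif_pos (by omega)]
    split
    · rfl
    · rename_i v' hv; rw [h1] at hv; cases hv
  | case3 p u hgt v h1 hne =>
    rw [menorLoop, dif_pos (by omega)]
    split
    · rename_i hv; rw [h1] at hv; cases hv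
    · rename_i v' hv; rw [h1] at hv; injection hv with hv; subst hv
      rw [if_pos (by omega)]
  | case4 p u hgt v h1 hne meio h2 =>
    rw [menorLoop, dif_pos (by omega)]
    simp only [meio] at h2
    split
    · rename_i hv; rw [h1] at hv
    · rename_i v' hv; rw [h1] at hv; injection hv with hv; subst hv
      rw [if_neg (by omega)]
      dsimp only
      rw [show p + (u + 1) - 1 = p + u by omega]
      split
      · rfl
      · rename_i w' hw2; rw [h2] at hw2; cases hw2
  | case5 p u hgt v h1 hne meio h2 ih =>
    rw [menorLoop, dif_pos (by omega)]
    simp only [meio] at h2 ih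
    split
    · rename_i hv; rw [h1] at hv; cases hv
    · rename_i v' hv; rw [h1] at hv; injection hv with hv; subst hv
      rw [if_neg (by omega)]
      dsimp only
      rw [show p + (u + 1) - 1 = p + u by omega]
      split
      · rename_i hw2; rw [h2] at hw2; cases hw2
      · rename_i w' hw2; rw [h2] at hw2; injection hw2 with hw2; subst hw2
        rw [if_pos rfl]
        exact ih
  | case6 p u hgt v h1 hne meio w' h2 hcond ih =>
    rw [menorLoop, dif_pos (by omega)]
    simp only [meio] at h2 hcond ih
    split
    · rename_i hv; rw [h1] at hv; cases hv
    · rename_i v2 hv; rw [h1] at hv; injection hv with hv; subst hv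
      rw [if_neg (by omega)]
      dsimp only
      rw [show p + (u + 1) - 1 = p + u by omega]
      split
      · rename_i hw2; rw [h2] at hw2; cases hw2
      · rename_i w2 hw2; rw [h2] at hw2; injection hw2 with hw2; subst hw2
        rw [if_neg hcond]
        exact ih

-- ===== VERDICT (by name: the statement is the Claim_ definition above) =====
theorem menorElemento_spec : Claim_equal_menorElemento := by
  intro lista p u _ _
  unfold Spec_menorElemento menorElemento_alt
  exact menorElemento_eq_loop lista p u
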